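-- pv_equiv track=rewrite | github.com/rohansiddeshwara-stride/GeneralNER | generalner.py | combine_unique_keys
-- ===== SOURCE A (Python) =====
-- def combine_unique_keys(dicts_list):
--     combined_dict = {}
--
--     for d in dicts_list:
--         for key, value in d.items():
--             if isinstance(value, list):
--                 for item in value:
--                     if key in combined_dict:
--                         if item not in combined_dict[key]:
--                             combined_dict[key].append(item)
--                     else:
--                         combined_dict[key] = [item]
--             else:
--                 if key in combined_dict:
--                     if value not in combined_dict[key]:
--                         combined_dict[key].append(value)
--                 else:
--                     combined_dict[key] = [value]
--
--     return combined_dict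
-- ===== SOURCE B (Python) =====
-- def combine_unique_keys(dicts_list):
--     groups = {}
--     for d in dicts_list:
--         for key, value in d.items():
--             items = value if isinstance(value, list) else [value]
--             for item in items:
--                 groups.setdefault(key, []).append(item)
--     return {k: list(dict.fromkeys(v)) for k, v in groups.items()}
-- ===== Notes on version B (the rewrite author's own statement) =====
-- stated objective: alternative
-- what changed: Replaces A's inline per-item 'not in' membership branch with a two-phase gather-then-dedup: phase 1 appends every item to a groups dict via setdefault, phase 2 dedups each value list with order-preserving dict.fromkeys.
import Mathlib
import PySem

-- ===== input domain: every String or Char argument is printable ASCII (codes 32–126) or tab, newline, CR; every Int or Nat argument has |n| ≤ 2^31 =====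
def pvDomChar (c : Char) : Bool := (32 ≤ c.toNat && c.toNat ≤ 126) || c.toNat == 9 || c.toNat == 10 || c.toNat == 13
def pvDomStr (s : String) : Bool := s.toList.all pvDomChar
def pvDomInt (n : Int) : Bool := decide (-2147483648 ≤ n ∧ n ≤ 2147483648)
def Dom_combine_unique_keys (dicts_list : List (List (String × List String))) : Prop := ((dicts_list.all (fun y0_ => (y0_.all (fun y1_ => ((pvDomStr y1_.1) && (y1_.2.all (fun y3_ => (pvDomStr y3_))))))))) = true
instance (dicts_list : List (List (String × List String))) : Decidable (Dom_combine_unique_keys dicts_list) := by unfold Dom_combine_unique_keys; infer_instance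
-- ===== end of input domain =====

-- B changes the decomposition: one gather pass appending every item, then a dedup pass per key (alternative, same cost class).
-- Under the type convention all dict values are List String, so A's non-list branch is unreachable and is not ported.

-- ===== PORT A =====
def combine_unique_keys (dicts_list : List (List (String × List String))) : List (String × List String) :=
  (dicts_list.foldl (fun cd d =>
      d.foldl (fun cd kv =>
        kv.2.foldl (fun cd item =>
          match cd.get? kv.1 with
          | some lst => if item ∈ lst then cd else cd.insert kv.1 (lst ++ [item])
          | none => cd.insert kv.1 [item]) cd) cd)
    (PySem.Dict.empty : PySem.Dict String (List String))).items

-- ===== PORT B =====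
def combine_unique_keys_alt (dicts_list : List (List (String × List String))) : List (String × List String) :=
  let groups : PySem.Dict String (List String) :=
    dicts_list.foldl (fun g d =>
      d.foldl (fun g kv =>
        kv.2.foldl (fun g item => g.modify kv.1 [] (· ++ [item])) g) g)
      PySem.Dict.empty
  groups.items.map (fun p => (p.1, PySem.List.dedup p.2))

-- ===== PRECONDITION & SPEC =====
def Spec_combine_unique_keys (dicts_list : List (List (String × List String))) (out : List (String × List String)) : Prop := out = combine_unique_keys_alt dicts_list
instance (dicts_list : List (List (String × List String))) (out : List (String × List String)) : Decidable (Spec_combine_unique_keys dicts_list out) := by unfold Spec_combine_unique_keys; infer_instance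

-- ===== CLAIM (what is proved, stated in full; the proofs are below) =====
def Claim_equal_combine_unique_keys : Prop := ∀ (dicts_list : List (List (String × List String))), Dom_combine_unique_keys dicts_list → Spec_combine_unique_keys dicts_list (combine_unique_keys dicts_list)

-- ===== LEMMAS AND PROOFS =====

-- map dedup over every value of a dict (B's phase 2, as a Dict transformer)
def mapDedup (g : PySem.Dict String (List String)) : PySem.Dict String (List String) :=
  PySem.Dict.mk (g.items.map (fun p => (p.1, PySem.List.dedup p.2)))

lemma get?_mapDedup (g : PySem.Dict String (List String)) (k : String) :
    (mapDedup g).get? k = (g.get? k).map PySem.List.dedup := by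
  obtain ⟨l⟩ := g
  induction l with
  | nil => rfl
  | cons p rest ih =>
    simp only [mapDedup, List.map_cons] at *
    by_cases h : p.1 == k
    · rw [PySem.Dict.get?_mk_cons, PySem.Dict.get?_mk_cons, if_pos h, if_pos h]; rfl
    · rw [PySem.Dict.get?_mk_cons, PySem.Dict.get?_mk_cons, if_neg h, if_neg h]; exact ih

lemma contains_mapDedup (g : PySem.Dict String (List String)) (k : String) :
    (mapDedup g).contains k = g.contains k := by
  rw [PySem.Dict.contains_eq_isSome_get?, PySem.Dict.contains_eq_isSome_get?, get?_mapDedup]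
  cases g.get? k <;> rfl

lemma dedup_append_mem {lst : List String} {item : String} (h : item ∈ lst) :
    PySem.List.dedup (lst ++ [item]) = PySem.List.dedup lst := by
  simp only [PySem.List.dedup_eq_ofList, PySem.Set.ofList_append_singleton]
  exact PySem.Set.add_of_mem (by simpa [PySem.Set.mem_ofList] using h)

lemma dedup_append_not_mem {lst : List String} {item : String} (h : item ∉ lst) :
    PySem.List.dedup (lst ++ [item]) = PySem.List.dedup lst ++ [item] := by
  simp only [PySem.List.dedup_eq_ofList, PySem.Set.ofList_append_singleton]
  exact PySem.Set.add_of_not_mem (by simpa [PySem.Set.mem_ofList] using h)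

-- a replacement map at a key absent from the list is the identity
lemma replace_id {α : Type} (l : List (String × α)) (key : String) (e : String × α)
    (h : key ∉ l.map Prod.fst) :
    l.map (fun p => if p.1 == key then e else p) = l := by
  induction l with
  | nil => rfl
  | cons p rest ih =>
    simp only [List.map_cons, List.mem_cons, not_or] at h ⊢
    have hne : ¬(p.1 == key) = true := by
      simp only [beq_iff_eq]; exact fun hh => h.1 hh.symm
    rw [if_neg hne, ih h.2]

-- when the item is already present, replacing the key's entry by lst ++ [item] is invisible after dedup
lemma replace_mem_dedup (l : List (String × List String)) (key item : String) (lst : List String)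
    (hnd : (l.map Prod.fst).Nodup)
    (hget : (PySem.Dict.mk l).get? key = some lst) (hmem : item ∈ lst) :
    (l.map (fun p => if p.1 == key then (key, lst ++ [item]) else p)).map
        (fun p => (p.1, PySem.List.dedup p.2))
      = l.map (fun p => (p.1, PySem.List.dedup p.2)) := by
  induction l with
  | nil => simp [PySem.Dict.get?] at hget
  | cons p rest ih =>
    rw [PySem.Dict.get?_mk_cons] at hget
    simp only [List.map_cons, List.nodup_cons] at hnd ⊢
    by_cases h : p.1 == key
    · rw [if_pos h] at hget
      have hlst : p.2 = lst := by simpa using hget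
      have hp : p.1 = key := by simpa using h
      have hk : (key : String) ∉ rest.map Prod.fst := hp ▸ hnd.1
      have hd : PySem.Set.ofList (lst ++ [item]) = PySem.Set.ofList lst := by
        simpa using dedup_append_mem hmem
      rw [if_pos h, replace_id rest key _ hk]
      have hd2 : PySem.Set.ofList (lst ++ [item]) = PySem.Set.ofList lst := by
        simpa using dedup_append_mem hmem
      simp [hp, hlst, hd2]
    · rw [if_neg h] at hget ⊢
      rw [ih hnd.2 hget]

-- the one-item step of A (on the dedupped dict) tracks the one-item step of B
lemma step_comm (g : PySem.Dict String (List String)) (key item : String)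
    (hnd : g.keys.Nodup) :
    (match (mapDedup g).get? key with
     | some lst => if item ∈ lst then mapDedup g else (mapDedup g).insert key (lst ++ [item])
     | none => (mapDedup g).insert key [item])
    = mapDedup (g.modify key [] (· ++ [item])) := by
  rw [get?_mapDedup, PySem.Dict.modify]
  cases hg : g.get? key with
  | none =>
    have hc : g.contains key = false := (PySem.Dict.get?_eq_none_iff_contains g key).mp hg
    have hc' : (mapDedup g).contains key = false := by rw [contains_mapDedup]; exact hc
    have hget : g.getD key [] = [] := by simp [PySem.Dict.getD_eq_get?_getD, hg]
    simp only [Option.map_none, hget, List.nil_append]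
    apply PySem.Dict.ext
    rw [PySem.Dict.items_insert_of_not_contains _ _ hc']
    have h2 : (mapDedup (g.insert key [item])).items
        = (g.items ++ [(key, [item])]).map (fun p => (p.1, PySem.List.dedup p.2)) := by
      simp only [mapDedup]
      rw [PySem.Dict.items_insert_of_not_contains _ _ hc]
    rw [h2]
    simp only [List.map_append, List.map_cons, List.map_nil, mapDedup]
    rfl
  | some lst =>
    have hc : g.contains key = true := by
      rw [PySem.Dict.contains_eq_isSome_get?, hg]; rfl
    have hc' : (mapDedup g).contains key = true := by rw [contains_mapDedup]; exact hc
    have hget : g.getD key [] = lst := by simp [PySem.Dict.getD_eq_get?_getD, hg]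
    simp only [Option.map_some, hget]
    by_cases hm : item ∈ lst
    · rw [if_pos (by simpa [PySem.List.mem_dedup] using hm)]
      apply PySem.Dict.ext
      have h2 : (mapDedup (g.insert key (lst ++ [item]))).items
          = (g.items.map (fun p => if (p.1 == key) = true then (key, lst ++ [item]) else p)).map
              (fun p => (p.1, PySem.List.dedup p.2)) := by
        simp only [mapDedup]
        rw [PySem.Dict.items_insert_of_contains _ _ hc]
      rw [h2, replace_mem_dedup g.items key item lst hnd hg hm]
      rfl
    · rw [if_neg (by simpa [PySem.List.mem_dedup] using hm)]
      apply PySem.Dict.ext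
      rw [PySem.Dict.items_insert_of_contains _ _ hc']
      have h2 : (mapDedup (g.insert key (lst ++ [item]))).items
          = (g.items.map (fun p => if (p.1 == key) = true then (key, lst ++ [item]) else p)).map
              (fun p => (p.1, PySem.List.dedup p.2)) := by
        simp only [mapDedup]
        rw [PySem.Dict.items_insert_of_contains _ _ hc]
      rw [h2]
      simp only [mapDedup, List.map_map]
      apply List.map_congr_left
      intro p _
      by_cases h : p.1 = key
      · simp [h]
        simpa using (dedup_append_not_mem hm).symm
      · simp [h]

lemma nodup_stepB (g : PySem.Dict String (List String)) (key : String) (f : List String → List String)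
    (hnd : g.keys.Nodup) : (g.modify key [] f).keys.Nodup := by
  rw [PySem.Dict.modify]
  exact PySem.Dict.nodup_keys_insert _ _ _ hnd

-- innermost loop (over the items of one value)
lemma fold_items (items : List String) (key : String) :
    ∀ (g : PySem.Dict String (List String)), g.keys.Nodup →
    (items.foldl (fun cd item =>
        match cd.get? key with
        | some lst => if item ∈ lst then cd else cd.insert key (lst ++ [item])
        | none => cd.insert key [item]) (mapDedup g)
      = mapDedup (items.foldl (fun g item => g.modify key [] (· ++ [item])) g))
    ∧ (items.foldl (fun g item => g.modify key [] (· ++ [item])) g).keys.Nodup := by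
  induction items with
  | nil => exact fun g hnd => ⟨rfl, hnd⟩
  | cons item rest ih =>
    intro g hnd
    have h1 := step_comm g key item hnd
    have h2 := nodup_stepB g key (· ++ [item]) hnd
    simp only [List.foldl_cons]
    rw [h1]
    exact ih _ h2

-- middle loop (over the items of one dict)
lemma fold_dict (d : List (String × List String)) :
    ∀ (g : PySem.Dict String (List String)), g.keys.Nodup →
    (d.foldl (fun cd kv =>
        kv.2.foldl (fun cd item =>
          match cd.get? kv.1 with
          | some lst => if item ∈ lst then cd else cd.insert kv.1 (lst ++ [item])
          | none => cd.insert kv.1 [item]) cd) (mapDedup g)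
      = mapDedup (d.foldl (fun g kv =>
          kv.2.foldl (fun g item => g.modify kv.1 [] (· ++ [item])) g) g))
    ∧ (d.foldl (fun g kv =>
        kv.2.foldl (fun g item => g.modify kv.1 [] (· ++ [item])) g) g).keys.Nodup := by
  induction d with
  | nil => exact fun g hnd => ⟨rfl, hnd⟩
  | cons kv rest ih =>
    intro g hnd
    obtain ⟨h1, h2⟩ := fold_items kv.2 kv.1 g hnd
    simp only [List.foldl_cons]
    rw [h1]
    exact ih _ h2

-- outer loop (over the list of dicts)
lemma fold_all (dl : List (List (String × List String))) :
    ∀ (g : PySem.Dict String (List String)), g.keys.Nodup →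
    dl.foldl (fun cd d =>
        d.foldl (fun cd kv =>
          kv.2.foldl (fun cd item =>
            match cd.get? kv.1 with
            | some lst => if item ∈ lst then cd else cd.insert kv.1 (lst ++ [item])
            | none => cd.insert kv.1 [item]) cd) cd) (mapDedup g)
      = mapDedup (dl.foldl (fun g d =>
          d.foldl (fun g kv =>
            kv.2.foldl (fun g item => g.modify kv.1 [] (· ++ [item])) g) g) g) := by
  induction dl with
  | nil => exact fun g _ => rfl
  | cons d rest ih =>
    intro g hnd
    obtain ⟨h1, h2⟩ := fold_dict d g hnd
    simp only [List.foldl_cons]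
    rw [h1]
    exact ih _ h2

-- ===== VERDICT (by name: the statement is the Claim_ definition above) =====
theorem combine_unique_keys_spec : Claim_equal_combine_unique_keys := by
  intro dl _
  unfold Spec_combine_unique_keys combine_unique_keys combine_unique_keys_alt
  have h := fold_all dl PySem.Dict.empty (by simp [PySem.Dict.keys_empty])
  have he : mapDedup PySem.Dict.empty = (PySem.Dict.empty : PySem.Dict String (List String)) := rfl
  rw [he] at h
  rw [h]
  rfl
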